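-- pv_equiv track=rewrite | github.com/MikasaAce/JAVA_Test_Version | app/api/create_process/c_module/c_XStream.py | select_best_xstream_vulnerability
-- ===== SOURCE A (Python) =====
-- def select_best_xstream_vulnerability(vulns):
--     """
--     从同一行的多个漏洞中选择最准确的一个
--     """
--     if len(vulns) == 1:
--         return vulns[0]
--
--     # 优先级：用户输入直接传递 > 危险模式 > XStream模式 > 上下文风险
--     priority_order = {
--         'user_input_direct': 1,
--         'dangerous_deserialization': 2,
--         'xstream_pattern': 3,
--         'deserialization_context': 4
--     }
--
--     # 按优先级排序
--     sorted_vulns = sorted(vulns, key=lambda x: priority_order.get(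
--         x.get('detection_type', 'deserialization_context'), 5
--     ))
--
--     # 选择优先级最高的漏洞
--     best_vuln = sorted_vulns[0]
--
--     # 如果同一行有多个XStream模式，合并描述
--     xstream_patterns = [v for v in vulns if v.get('detection_type') == 'xstream_pattern']
--     if len(xstream_patterns) > 1:
--         pattern_count = len(xstream_patterns)
--         best_vuln['message'] = f"发现 {pattern_count} 个XStream相关模式"
--
--     return best_vuln
-- ===== SOURCE B (Python) =====
-- def select_best_xstream_vulnerability(vulns):
--     priority_order = {
--         'user_input_direct': 1,
--         'dangerous_deserialization': 2,
--         'xstream_pattern': 3,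
--         'deserialization_context': 4
--     }
--     best_vuln = vulns[0]
--     best_priority = priority_order.get(best_vuln.get('detection_type', 'deserialization_context'), 5)
--     xstream_count = 0
--     for v in vulns:
--         p = priority_order.get(v.get('detection_type', 'deserialization_context'), 5)
--         if p < best_priority:
--             best_vuln, best_priority = v, p
--         if v.get('detection_type') == 'xstream_pattern':
--             xstream_count += 1
--     if xstream_count > 1:
--         best_vuln['message'] = f"发现 {xstream_count} 个XStream相关模式"
--     return best_vuln
-- ===== Notes on version B (the rewrite author's own statement) =====
-- stated objective: alternative
-- what changed: Replaces A's sort of the whole list plus a separate filter pass with one linear fold that keeps the first element of minimal priority and counts xstream_pattern entries in the same pass.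
import Mathlib
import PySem

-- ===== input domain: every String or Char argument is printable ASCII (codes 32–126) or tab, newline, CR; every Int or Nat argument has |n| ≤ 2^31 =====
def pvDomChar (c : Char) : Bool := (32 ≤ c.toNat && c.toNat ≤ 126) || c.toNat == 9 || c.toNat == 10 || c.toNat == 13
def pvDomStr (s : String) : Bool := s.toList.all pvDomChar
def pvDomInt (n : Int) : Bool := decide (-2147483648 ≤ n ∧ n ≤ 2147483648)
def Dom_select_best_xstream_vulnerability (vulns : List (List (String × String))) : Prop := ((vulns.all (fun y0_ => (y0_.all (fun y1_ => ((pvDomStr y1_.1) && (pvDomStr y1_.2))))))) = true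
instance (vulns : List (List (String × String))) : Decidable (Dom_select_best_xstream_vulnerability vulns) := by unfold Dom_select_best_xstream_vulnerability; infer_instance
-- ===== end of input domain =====

-- B replaces sort-then-pick + separate filter with ONE linear fold (first minimal-priority element
-- + xstream_pattern count); both A and B set best_vuln['message'] in place in the same cases, and
-- the equivalence proved here is about the return value.

-- shared helpers (both Python versions contain these identical sub-expressions)
def pvPriorityOrder : PySem.Dict String Int :=
  PySem.Dict.mk [("user_input_direct", 1), ("dangerous_deserialization", 2),
                 ("xstream_pattern", 3), ("deserialization_context", 4)]

-- priority_order.get(v.get('detection_type', 'deserialization_context'), 5)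
def pvPrio (v : List (String × String)) : Int :=
  pvPriorityOrder.getD ((PySem.Dict.mk v).getD "detection_type" "deserialization_context") 5

-- v.get('detection_type') == 'xstream_pattern'
def pvIsXStream (v : List (String × String)) : Bool :=
  (PySem.Dict.mk v).get? "detection_type" == some "xstream_pattern"

-- f"发现 {n} 个XStream相关模式"
def pvMsg (n : Int) : String := "发现 " ++ PySem.Int.toStr n ++ " 个XStream相关模式"

-- ===== PORT A =====
def select_best_xstream_vulnerability (vulns : List (List (String × String))) : List (String × String) :=
  if vulns.length = 1 then vulns.headI
  else
    let sortedVulns := PySem.List.sorted vulns pvPrio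
    let bestVuln := sortedVulns.headI
    let xstreamPatterns := vulns.filter (fun v => pvIsXStream v)
    if 1 < xstreamPatterns.length then
      (PySem.Dict.insert (PySem.Dict.mk bestVuln) "message" (pvMsg (xstreamPatterns.length : Int))).items
    else bestVuln

-- ===== PORT B =====
def select_best_xstream_vulnerability_alt (vulns : List (List (String × String))) : List (String × String) :=
  match vulns with
  | [] => []   -- Python B raises IndexError here (vulns[0]); outside Pre_
  | v0 :: _ =>
    -- the for-loop over vulns with accumulators ((best_vuln, best_priority), xstream_count)
    let r := vulns.foldl
      (fun st v =>
        ((if pvPrio v < st.1.2 then (v, pvPrio v) else st.1),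
         (if pvIsXStream v then st.2 + 1 else st.2)))
      ((v0, pvPrio v0), (0 : Int))
    if 1 < r.2 then
      (PySem.Dict.insert (PySem.Dict.mk r.1.1) "message" (pvMsg r.2)).items
    else r.1.1

-- ===== PRECONDITION & SPEC =====
-- A (and B) raise IndexError on the empty list; that is the only excluded input.
def Pre_select_best_xstream_vulnerability (vulns : List (List (String × String))) : Prop := vulns ≠ []
instance (vulns : List (List (String × String))) : Decidable (Pre_select_best_xstream_vulnerability vulns) := by unfold Pre_select_best_xstream_vulnerability; infer_instance

def pvWitness_select_best_xstream_vulnerability : (List (List (String × String))) :=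
  [[("detection_type", "xstream_pattern"), ("message", "m")]]

def Spec_select_best_xstream_vulnerability (vulns : List (List (String × String))) (out : List (String × String)) : Prop := out = select_best_xstream_vulnerability_alt vulns
instance (vulns : List (List (String × String))) (out : List (String × String)) : Decidable (Spec_select_best_xstream_vulnerability vulns out) := by unfold Spec_select_best_xstream_vulnerability; infer_instance

-- ===== CLAIM (what is proved, stated in full; the proofs are below) =====
def Claim_equal_select_best_xstream_vulnerability : Prop := ∀ (vulns : List (List (String × String))), Dom_select_best_xstream_vulnerability vulns → Pre_select_best_xstream_vulnerability vulns → Spec_select_best_xstream_vulnerability vulns (select_best_xstream_vulnerability vulns)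

-- ===== LEMMAS AND PROOFS =====

-- the running first-minimum step (ties keep the earlier element)
def pvMinStep (c v : List (String × String)) : List (String × String) :=
  if pvPrio v < pvPrio c then v else c

-- head of insertBy with the sorted-order test is the strict-min update
theorem pv_headI_insertBy (x : List (String × String)) (acc : List (List (String × String)))
    (h : acc ≠ []) :
    (PySem.List.insertBy (fun a b => decide (pvPrio a < pvPrio b)) x acc).headI
      = pvMinStep acc.headI x := by
  cases acc with
  | nil => exact absurd rfl h
  | cons y ys =>
    simp only [PySem.List.insertBy, pvMinStep, List.headI]
    split_ifs with h1 h2 h3 <;> simp_all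

theorem pv_insertBy_ne_nil (bf : List (String × String) → List (String × String) → Bool)
    (x : List (String × String)) (acc : List (List (String × String))) :
    PySem.List.insertBy bf x acc ≠ [] := by
  intro hnil
  have : x ∈ PySem.List.insertBy bf x acc := (PySem.List.mem_insertBy bf x x acc).2 (Or.inl rfl)
  simp [hnil] at this

-- head of the insertion-sort fold = running first-minimum
theorem pv_headI_foldl_insertBy (t : List (List (String × String))) :
    ∀ acc : List (List (String × String)), acc ≠ [] →
    (t.foldl (fun acc x => PySem.List.insertBy (fun a b => decide (pvPrio a < pvPrio b)) x acc) acc).headI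
      = t.foldl pvMinStep acc.headI := by
  induction t with
  | nil => intro acc _; rfl
  | cons v t ih =>
    intro acc hacc
    simp only [List.foldl_cons]
    rw [ih _ (pv_insertBy_ne_nil _ v acc), pv_headI_insertBy v acc hacc]

-- sorted(xs, key)[0] is the first element of minimal key
theorem pv_sorted_headI (b : List (String × String)) (t : List (List (String × String))) :
    (PySem.List.sorted (b :: t) pvPrio).headI = t.foldl pvMinStep b := by
  rw [PySem.List.sorted_eq_foldl_insertBy]
  simp only [List.foldl_cons]
  have h1 : PySem.List.insertBy (fun a b => decide (pvPrio a < pvPrio b)) b [] = [b] := rfl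
  rw [h1, pv_headI_foldl_insertBy t [b] (by simp)]
  rfl

-- B's (best, best_priority) accumulator projects to the running first-minimum
theorem pv_foldl_pair (t : List (List (String × String))) :
    ∀ b : List (String × String),
    t.foldl (fun s v => if pvPrio v < s.2 then (v, pvPrio v) else s) (b, pvPrio b)
      = (t.foldl pvMinStep b, pvPrio (t.foldl pvMinStep b)) := by
  induction t with
  | nil => intro b; rfl
  | cons v t ih =>
    intro b
    simp only [List.foldl_cons, pvMinStep]
    by_cases h : pvPrio v < pvPrio b
    · simp only [h, if_true]; exact ih v
    · simp only [h, if_false]; exact ih b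

theorem pv_main (v0 : List (String × String)) (rest : List (List (String × String))) :
    select_best_xstream_vulnerability (v0 :: rest)
      = select_best_xstream_vulnerability_alt (v0 :: rest) := by
  -- evaluate B's fold
  have hsplit :
      (v0 :: rest).foldl
        (fun st v =>
          ((if pvPrio v < st.1.2 then (v, pvPrio v) else st.1),
           (if pvIsXStream v then st.2 + 1 else st.2)))
        ((v0, pvPrio v0), (0 : Int))
      = ((v0 :: rest).foldl (fun s v => if pvPrio v < s.2 then (v, pvPrio v) else s) (v0, pvPrio v0),
         (v0 :: rest).foldl (fun c v => if pvIsXStream v then c + 1 else c) (0 : Int)) := by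
    exact PySem.List.foldl_prod_mk
      (f := fun s v => if pvPrio v < s.2 then (v, pvPrio v) else s)
      (g := fun c v => if pvIsXStream v then c + 1 else c) _ _ _
  have hbest :
      (v0 :: rest).foldl (fun s v => if pvPrio v < s.2 then (v, pvPrio v) else s) (v0, pvPrio v0)
        = (rest.foldl pvMinStep v0, pvPrio (rest.foldl pvMinStep v0)) := by
    simp only [List.foldl_cons, lt_irrefl, if_false]
    exact pv_foldl_pair rest v0
  have hcount :
      (v0 :: rest).foldl (fun c v => if pvIsXStream v then c + 1 else c) (0 : Int)
        = (((v0 :: rest).filter (fun v => pvIsXStream v)).length : Int) := by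
    rw [PySem.List.foldl_if_add_one pvIsXStream (v0 :: rest) 0]
    simp [List.countP_eq_length_filter]
  have hhead := pv_sorted_headI v0 rest
  cases rest with
  | nil =>
    -- A's len == 1 early return; B's count over one element is ≤ 1
    simp only [select_best_xstream_vulnerability, select_best_xstream_vulnerability_alt,
      List.length_cons, List.length_nil, if_true, List.headI]
    rw [hsplit, hbest, hcount]
    simp only [List.foldl_nil, List.filter]
    cases h : pvIsXStream v0 <;> simp
  | cons w t =>
    simp only [select_best_xstream_vulnerability, select_best_xstream_vulnerability_alt]
    rw [if_neg (by simp)]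
    rw [hsplit, hbest, hcount, hhead]
    dsimp only
    by_cases h : 1 < (List.filter (fun v => pvIsXStream v) (v0 :: w :: t)).length
    · rw [if_pos h, if_pos (show (1 : Int) < _ from by exact_mod_cast h)]
    · rw [if_neg h, if_neg (show ¬ (1 : Int) < _ from by exact_mod_cast h)]

-- ===== VERDICT (by name: the statement is the Claim_ definition above) =====
theorem select_best_xstream_vulnerability_spec : Claim_equal_select_best_xstream_vulnerability := by
  intro vulns _ hpre
  unfold Spec_select_best_xstream_vulnerability
  cases vulns with
  | nil => exact absurd rfl hpre
  | cons v0 rest => exact pv_main v0 rest
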